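-- pv_equiv track=rewrite | github.com/cfevrius/CodingBat | source/array2.py | ten_run
-- ===== SOURCE A (Python) =====
-- def ten_run(nums):
--     """For each multiple of 10 in the given array, change all the values following it to be that multiple
--     of 10, until encountering another multiple of 10. So [2, 10, 3, 4, 20, 5] yields
--     [2, 10, 10, 10, 20, 20].
--     """
--     indices_of_multiples_of_ten = [(i, val) for i, val in enumerate(nums) if val % 10 == 0]
--     result = nums[:]
--     # indices_of_multiples_of_ten = [(1, 10), (4, 20)]
--     for i, v in enumerate(indices_of_multiples_of_ten):
--         start = indices_of_multiples_of_ten[i][0]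
--         end = indices_of_multiples_of_ten[i+1][0] if 0 <= i+1 < len(indices_of_multiples_of_ten) else len(nums)
--         result[start:end] = (end - start) * [indices_of_multiples_of_ten[i][1]]
--     return result
-- ===== SOURCE B (Python) =====
-- def ten_run(nums):
--     """For each multiple of 10 in the given array, change all the values following it to be that multiple
--     of 10, until encountering another multiple of 10."""
--     result = []
--     cur = None
--     for x in nums:
--         if x % 10 == 0:
--             cur = x
--         result.append(x if cur is None else cur)
--     return result
-- ===== Notes on version B (the rewrite author's own statement) =====
-- stated objective: simpler
-- what changed: Replaces the index-of-multiples pass plus per-segment slice assignment with a single forward pass carrying the last multiple of 10 as state.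
import Mathlib
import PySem

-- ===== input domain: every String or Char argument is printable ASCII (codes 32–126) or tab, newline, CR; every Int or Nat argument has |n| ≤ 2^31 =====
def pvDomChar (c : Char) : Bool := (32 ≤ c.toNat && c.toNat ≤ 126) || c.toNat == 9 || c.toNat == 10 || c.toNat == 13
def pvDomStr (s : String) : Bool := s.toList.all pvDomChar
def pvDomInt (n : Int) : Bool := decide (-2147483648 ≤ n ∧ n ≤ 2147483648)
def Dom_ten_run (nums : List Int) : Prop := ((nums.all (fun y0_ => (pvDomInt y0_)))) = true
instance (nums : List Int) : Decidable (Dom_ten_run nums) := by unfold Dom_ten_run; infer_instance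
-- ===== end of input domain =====

-- B replaces A's index-of-multiples pass plus per-segment slice assignment with one
-- forward pass carrying the last seen multiple of 10 as state (objective: simpler).

-- ===== PORT A =====
-- Literal port of A: build the (index, value) list of multiples of 10, copy nums,
-- then for each such pair overwrite result[start:end] with (end-start)*[value].
-- The slice assignment is ported as take/replicate/drop, exact here because the
-- indices produced by the algorithm always satisfy 0 ≤ start ≤ end ≤ len(result).
def ten_run (nums : List Int) : List Int :=
  let pairs := (PySem.List.enumerate nums).filter (fun p => PySem.Int.mod p.2 10 == 0)
  let result := nums  -- nums[:] (a copy; the Lean list is immutable anyway)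
  (PySem.List.enumerate pairs).foldl (fun result iv =>
    let start := (PySem.List.pyGetD pairs iv.1 (0, 0)).1
    let e := if 0 ≤ iv.1 + 1 ∧ iv.1 + 1 < (pairs.length : Int)
      then (PySem.List.pyGetD pairs (iv.1 + 1) (0, 0)).1 else (nums.length : Int)
    result.take start.toNat ++ PySem.List.pyRepeat [(PySem.List.pyGetD pairs iv.1 (0, 0)).2] (e - start) ++ result.drop e.toNat
  ) result

-- ===== PORT B =====
-- B's loop (append to result, carrying cur : Optional[int]) as the obvious recursion.
def tenRunGo (cur : Option Int) : List Int → List Int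
  | [] => []
  | x :: xs =>
    let cur' := if PySem.Int.mod x 10 == 0 then some x else cur
    (cur'.getD x) :: tenRunGo cur' xs

def ten_run_alt (nums : List Int) : List Int := tenRunGo none nums

-- ===== PRECONDITION & SPEC =====
def Spec_ten_run (nums : List Int) (out : List Int) : Prop := out = ten_run_alt nums
instance (nums : List Int) (out : List Int) : Decidable (Spec_ten_run nums out) := by unfold Spec_ten_run; infer_instance

-- ===== CLAIM (what is proved, stated in full; the proofs are below) =====
def Claim_equal_ten_run : Prop := ∀ (nums : List Int), Dom_ten_run nums → Spec_ten_run nums (ten_run nums)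

-- ===== LEMMAS AND PROOFS =====

-- The (index, value) pairs of multiples of 10, as computed by A.
def pvPairs (xs : List Int) : List (Int × Int) :=
  (PySem.List.enumerate xs).filter (fun p => PySem.Int.mod p.2 10 == 0)

-- A's loop body, abstracted over the pair list and the length of nums.
def pvStep (P : List (Int × Int)) (n : Nat) : List Int → Int × (Int × Int) → List Int :=
  fun result iv =>
    let start := (PySem.List.pyGetD P iv.1 (0, 0)).1
    let e := if 0 ≤ iv.1 + 1 ∧ iv.1 + 1 < (P.length : Int)
      then (PySem.List.pyGetD P (iv.1 + 1) (0, 0)).1 else (n : Int)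
    result.take start.toNat ++ PySem.List.pyRepeat [(PySem.List.pyGetD P iv.1 (0, 0)).2] (e - start) ++ result.drop e.toNat

-- The filled tail: from the first listed multiple to the end of the list.
def pvFill : List (Int × Int) → Nat → List Int
  | [], _ => []
  | [(s, v)], n => List.replicate (n - s.toNat) v
  | (s, v) :: q :: rest, n => List.replicate (q.1.toNat - s.toNat) v ++ pvFill (q :: rest) n

-- Index of the first multiple of 10 (length of xs if none).
def pvHead (xs : List Int) : Nat :=
  match pvPairs xs with
  | [] => xs.length
  | p :: _ => p.1.toNat

theorem ten_run_eq_fold (nums : List Int) :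
    ten_run nums = (PySem.List.enumerate (pvPairs nums)).foldl (pvStep (pvPairs nums) nums.length) nums := rfl

theorem pvPairs_bounds (xs : List Int) : ∀ p ∈ pvPairs xs, 0 ≤ p.1 ∧ p.1 < (xs.length : Int) := by
  intro p hp
  have := (List.mem_filter.mp hp).1
  rcases (PySem.List.mem_enumerate_iff _ _ _).mp this with ⟨k, hk, rfl⟩
  refine ⟨by simp, ?_⟩
  simp
  omega

theorem pvPairs_pairwise (xs : List Int) : (pvPairs xs).Pairwise (fun p q => p.1 < q.1) :=
  List.Pairwise.sublist List.filter_sublist (PySem.List.pairwise_lt_enumerate (xs := xs) (s := 0))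

theorem enumerate_shift (xs : List Int) : ∀ s : Int,
    PySem.List.enumerate xs (s + 1) = (PySem.List.enumerate xs s).map (fun p => (p.1 + 1, p.2)) := by
  induction xs with
  | nil => intro s; simp [PySem.List.enumerate_nil]
  | cons x xs ih =>
    intro s
    rw [PySem.List.enumerate_cons, PySem.List.enumerate_cons]
    have : s + 1 + 1 = (s + 1) + 1 := by ring
    simp [ih (s + 1)]

theorem pvPairs_cons (x : Int) (xs : List Int) :
    pvPairs (x :: xs) =
      (if PySem.Int.mod x 10 == 0 then [((0 : Int), x)] else []) ++
        (pvPairs xs).map (fun p => (p.1 + 1, p.2)) := by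
  unfold pvPairs
  have h1 := enumerate_shift xs 0
  rw [PySem.List.enumerate_cons, List.filter_cons, h1, List.filter_map]
  simp only [Function.comp_def]
  split <;> simp

theorem pvFill_shift : ∀ (P : List (Int × Int)) (n : Nat), (∀ p ∈ P, 0 ≤ p.1) →
    pvFill (P.map (fun p => (p.1 + 1, p.2))) (n + 1) = pvFill P n := by
  intro P
  induction P with
  | nil => intro n _; rfl
  | cons p P' ih =>
    intro n hb
    obtain ⟨s, v⟩ := p
    have hs : 0 ≤ s := hb (s, v) (by simp)
    cases P' with
    | nil =>
      simp only [List.map, pvFill]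
      congr 1
      omega
    | cons q rest =>
      obtain ⟨s', v'⟩ := q
      have hs' : 0 ≤ s' := by have := hb (s', v') (by simp); exact this
      simp only [List.map, pvFill]
      rw [show ((s' + 1, v') : Int × Int) :: List.map (fun p : Int × Int => (p.1 + 1, p.2)) rest
            = List.map (fun p : Int × Int => (p.1 + 1, p.2)) ((s', v') :: rest) from rfl]
      rw [ih n (fun p hp => hb p (List.mem_cons_of_mem _ hp))]
      congr 2
      omega

theorem pvFill_single (p : Int × Int) (n : Nat) :
    pvFill [p] n = List.replicate (n - p.1.toNat) p.2 := by
  obtain ⟨s, v⟩ := p; rfl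

theorem pvFill_cons_cons (p q : Int × Int) (rest : List (Int × Int)) (n : Nat) :
    pvFill (p :: q :: rest) n = List.replicate (q.1.toNat - p.1.toNat) p.2 ++ pvFill (q :: rest) n := by
  obtain ⟨s, v⟩ := p; obtain ⟨s', v'⟩ := q; rfl

-- Closed form for A's fold, peeling from position k of the enumerated pair list.
theorem foldFK (P : List (Int × Int)) (n : Nat)
    (hb : ∀ p ∈ P, 0 ≤ p.1 ∧ p.1 < (n : Int))
    (hp : P.Pairwise (fun p q => p.1 < q.1)) :
    ∀ (m k : Nat) (r : List Int), P.length - k = m → r.length = n →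
      ((PySem.List.enumerate P).drop k).foldl (pvStep P n) r =
        if k < P.length then r.take ((P.getD k (0, 0)).1.toNat) ++ pvFill (P.drop k) n else r := by
  intro m
  induction m with
  | zero =>
    intro k r hm _
    rw [if_neg (by omega)]
    have h1 : (PySem.List.enumerate P).drop k = [] :=
      List.drop_eq_nil_of_le (by rw [PySem.List.length_enumerate]; omega)
    rw [h1, List.foldl_nil]
  | succ m ih =>
    intro k r hm hr
    have hk : k < P.length := by omega
    have hkE : k < (PySem.List.enumerate P).length := by rw [PySem.List.length_enumerate]; omega
    rw [List.drop_eq_getElem_cons hkE, List.foldl_cons, PySem.List.getElem_enumerate]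
    have hgetD : P.getD k (0, 0) = P[k] := by
      rw [List.getD_eq_getElem?_getD, List.getElem?_eq_getElem hk, Option.getD_some]
    obtain ⟨hs0, hsn⟩ := hb P[k] (List.getElem_mem hk)
    have hPget : PySem.List.pyGetD P ((0 : Int) + (k : Nat)) (0, 0) = P[k] := by
      rw [show ((0 : Int) + (k : Nat)) = ((k : Nat) : Int) by ring, PySem.List.pyGetD_natCast,
        List.getD_eq_getElem?_getD, List.getElem?_eq_getElem hk, Option.getD_some]
    by_cases hlast : k + 1 < P.length
    · obtain ⟨hs0', hsn'⟩ := hb P[k + 1] (List.getElem_mem hlast)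
      have hlt : P[k].1 < P[k + 1].1 :=
        List.pairwise_iff_getElem.mp hp k (k + 1) hk hlast (by omega)
      have hPget1 : PySem.List.pyGetD P ((0 : Int) + (k : Nat) + 1) (0, 0) = P[k + 1] := by
        rw [show ((0 : Int) + (k : Nat) + 1) = (((k + 1 : Nat)) : Int) by push_cast; ring,
          PySem.List.pyGetD_natCast, List.getD_eq_getElem?_getD,
          List.getElem?_eq_getElem hlast, Option.getD_some]
      have hcond : (0 ≤ (0 : Int) + (k : Nat) + 1 ∧ (0 : Int) + (k : Nat) + 1 < (P.length : Int)) := by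
        constructor
        · omega
        · omega
      have hcount : (P[k + 1].1 - P[k].1).toNat = P[k + 1].1.toNat - P[k].1.toNat := by omega
      have hstep : pvStep P n r ((0 : Int) + (k : Nat), P[k]) =
          r.take P[k].1.toNat ++ List.replicate (P[k + 1].1.toNat - P[k].1.toNat) P[k].2
            ++ r.drop P[k + 1].1.toNat := by
        simp only [pvStep, if_pos hcond]
        rw [hPget1, hPget, PySem.List.pyRepeat_singleton, hcount]
      rw [hstep]
      have hlen : (r.take P[k].1.toNat ++ List.replicate (P[k + 1].1.toNat - P[k].1.toNat) P[k].2
          ++ r.drop P[k + 1].1.toNat).length = n := by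
        rw [List.length_append, List.length_append, List.length_take, List.length_replicate,
          List.length_drop]
        omega
      rw [ih (k + 1) _ (by omega) hlen, if_pos hlast]
      have hgetD1 : P.getD (k + 1) (0, 0) = P[k + 1] := by
        rw [List.getD_eq_getElem?_getD, List.getElem?_eq_getElem hlast, Option.getD_some]
      rw [hgetD1, hgetD]
      have htake : (r.take P[k].1.toNat ++ List.replicate (P[k + 1].1.toNat - P[k].1.toNat) P[k].2
          ++ r.drop P[k + 1].1.toNat).take P[k + 1].1.toNat
          = r.take P[k].1.toNat ++ List.replicate (P[k + 1].1.toNat - P[k].1.toNat) P[k].2 := by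
        rw [List.take_append_of_le_length
            (by rw [List.length_append, List.length_take, List.length_replicate]; omega),
          List.take_of_length_le
            (by rw [List.length_append, List.length_take, List.length_replicate]; omega)]
      rw [htake]
      have hdropP : P.drop k = P[k] :: P.drop (k + 1) := List.drop_eq_getElem_cons hk
      have hdropP1 : P.drop (k + 1) = P[k + 1] :: P.drop (k + 2) := List.drop_eq_getElem_cons hlast
      rw [hdropP, hdropP1, pvFill_cons_cons, ← hdropP1, List.append_assoc, if_pos hk]
    · have hcond : ¬ (0 ≤ (0 : Int) + (k : Nat) + 1 ∧ (0 : Int) + (k : Nat) + 1 < (P.length : Int)) := by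
        rintro ⟨-, h2⟩
        omega
      have hcount : ((n : Int) - P[k].1).toNat = n - P[k].1.toNat := by omega
      have hstep : pvStep P n r ((0 : Int) + (k : Nat), P[k]) =
          r.take P[k].1.toNat ++ List.replicate (n - P[k].1.toNat) P[k].2 ++ r.drop n := by
        simp only [pvStep, if_neg hcond]
        rw [hPget, PySem.List.pyRepeat_singleton, Int.toNat_natCast, hcount]
      rw [hstep]
      have hdone : (PySem.List.enumerate P).drop (k + 1) = [] :=
        List.drop_eq_nil_of_le (by rw [PySem.List.length_enumerate]; omega)
      rw [hdone, List.foldl_nil, if_pos hk, hgetD]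
      have hdropP : P.drop k = [P[k]] := by
        rw [List.drop_eq_getElem_cons hk, List.drop_eq_nil_of_le (by omega)]
      rw [hdropP, pvFill_single, List.drop_of_length_le (by omega), List.append_nil]

-- Closed form for B's recursion, for either starting state.
theorem tenRunGo_closed (xs : List Int) : ∀ c : Option Int,
    tenRunGo c xs =
      (match c with
        | none => xs.take (pvHead xs)
        | some cv => List.replicate (pvHead xs) cv) ++ pvFill (pvPairs xs) xs.length := by
  induction xs with
  | nil =>
    intro c
    cases c <;> simp [tenRunGo, pvHead, pvPairs, PySem.List.enumerate_nil, pvFill]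
  | cons x xs ih =>
    intro c
    have hcons := pvPairs_cons x xs
    have hb : ∀ p ∈ pvPairs xs, 0 ≤ p.1 := fun p hp => (pvPairs_bounds xs p hp).1
    by_cases hx : (10 : Int) ∣ x
    · rw [if_pos (by simpa using hx)] at hcons
      have hgo : tenRunGo c (x :: xs) = x :: tenRunGo (some x) xs := by
        simp [tenRunGo, hx]
      have hhead : pvHead (x :: xs) = 0 := by simp [pvHead, hcons]
      rw [hgo, ih (some x), hhead, hcons]
      cases hP : pvPairs xs with
      | nil =>
        have hhead' : pvHead xs = xs.length := by simp [pvHead, hP]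
        rw [hhead']
        cases c <;> simp [pvFill, List.replicate_succ]
      | cons q rest =>
        obtain ⟨s, v⟩ := q
        have hs : 0 ≤ s := hb (s, v) (by simp [hP])
        have hhead' : pvHead xs = s.toNat := by simp [pvHead, hP]
        have hshift : ∀ p ∈ ((s, v) :: rest : List (Int × Int)), 0 ≤ p.1 := by
          rw [← hP]; exact hb
        have hfill : pvFill ([((0 : Int), x)] ++ (((s, v) :: rest : List (Int × Int)).map
              (fun p => (p.1 + 1, p.2)))) ((x :: xs).length)
            = List.replicate (s.toNat + 1) x ++ pvFill ((s, v) :: rest) xs.length := by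
          rw [List.singleton_append,
            show (((s, v) :: rest : List (Int × Int)).map (fun p => (p.1 + 1, p.2)))
              = ((s + 1, v) : Int × Int) :: rest.map (fun p => (p.1 + 1, p.2)) from rfl,
            pvFill_cons_cons,
            show (((s + 1, v) : Int × Int) :: rest.map (fun p : Int × Int => (p.1 + 1, p.2)))
              = (((s, v) :: rest : List (Int × Int)).map (fun p => (p.1 + 1, p.2))) from rfl,
            show (x :: xs).length = xs.length + 1 from rfl, pvFill_shift _ _ hshift]
          congr 2
          omega
        rw [hhead', hfill]
        cases c <;> simp [List.replicate_succ]
    · rw [if_neg (by simpa using hx), List.nil_append] at hcons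
      have hgo : tenRunGo c (x :: xs) = (c.getD x) :: tenRunGo c xs := by
        simp [tenRunGo, hx]
      rw [hgo, ih c]
      cases hP : pvPairs xs with
      | nil =>
        rw [hP] at hcons
        simp only [List.map_nil] at hcons
        have hhead : pvHead (x :: xs) = (x :: xs).length := by simp [pvHead, hcons]
        have hhead' : pvHead xs = xs.length := by simp [pvHead, hP]
        rw [hcons, hhead, hhead']
        cases c <;> simp [pvFill, List.replicate_succ]
      | cons q rest =>
        obtain ⟨s, v⟩ := q
        have hs : 0 ≤ s := hb (s, v) (by simp [hP])
        rw [hP] at hcons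
        have hhead : pvHead (x :: xs) = s.toNat + 1 := by
          simp only [pvHead, hcons, List.map_cons]
          omega
        have hhead' : pvHead xs = s.toNat := by simp [pvHead, hP]
        have hshift : ∀ p ∈ ((s, v) :: rest : List (Int × Int)), 0 ≤ p.1 := by
          rw [← hP]; exact hb
        have hfill : pvFill (((s, v) :: rest : List (Int × Int)).map (fun p => (p.1 + 1, p.2)))
              ((x :: xs).length) = pvFill ((s, v) :: rest) xs.length := by
          rw [show (x :: xs).length = xs.length + 1 from rfl]
          exact pvFill_shift _ _ hshift
        rw [hcons, hhead, hhead', hfill]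
        cases c <;> simp [List.replicate_succ]

theorem ten_run_eq_alt (nums : List Int) : ten_run nums = ten_run_alt nums := by
  have h := foldFK (pvPairs nums) nums.length (pvPairs_bounds nums) (pvPairs_pairwise nums)
    (pvPairs nums).length 0 nums (by omega) rfl
  rw [List.drop_zero, List.drop_zero] at h
  rw [ten_run_eq_fold, h,
    show ten_run_alt nums = tenRunGo none nums from rfl, tenRunGo_closed nums none]
  cases hP : pvPairs nums with
  | nil =>
    rw [if_neg (by simp)]
    simp [pvHead, hP, pvFill]
  | cons q rest =>
    obtain ⟨s, v⟩ := q
    rw [if_pos (by simp)]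
    simp [pvHead, hP]

-- ===== VERDICT (by name: the statement is the Claim_ definition above) =====
theorem ten_run_spec : Claim_equal_ten_run := by
  intro nums _
  unfold Spec_ten_run
  exact ten_run_eq_alt nums
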